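-- pv_equiv track=rewrite | github.com/DoctorDalek1963/WhatsApp-HTML-Formatter | oop-library.py | complete_format_to_html
-- ===== SOURCE A (Python) =====
-- formatDict = {'_': 'em', '*': 'strong', '~': 'del'}  # Dict of format chars with their HTML tags
--
-- def simple_format_to_html(string: str) -> str:
--     """Replace WhatsApp format characters with their HTML tags. Doesn't handle code blocks."""
--     first_tag = True
--     list_string = list(string)
--
--     for char, tag in formatDict.items():
--         if char in string and string.count(char) % 2 == 0:
--             for x, letter in enumerate(list_string):
--                 if letter == char:
--                     if first_tag:
--                         list_string[x] = f'<{tag}>'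
--                         first_tag = False
--                     else:
--                         list_string[x] = f'</{tag}>'
--                         first_tag = True
--
--     return ''.join(list_string)
--
-- def complete_format_to_html(string: str) -> str:
--     """Replace WhatsApp format characters with their HTML tags. Handles code blocks."""
--     first_tag = True
--     if '```' in string:
--         string = string.replace('```', '<code>')
--         list_string = list(string)
--         for x, letter in enumerate(list_string):
--             if letter == '<':
--                 if first_tag:
--                     first_tag = False
--                 else:
--                     list_string[x] = '</'
--                     first_tag = True
--
--         string = ''.join(list_string)
--     else:
--         string = simple_format_to_html(string)
--
--     return string
-- ===== SOURCE B (Python) =====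
-- # Split/join reassembly instead of char-list mutation with a toggle flag.
-- formatDict = {'_': 'em', '*': 'strong', '~': 'del'}
--
--
-- def _rejoin(parts, open_tag, close_tag):
--     """parts[0], then each later part prefixed by open/close tags alternately."""
--     out = [parts[0]]
--     for i, part in enumerate(parts[1:]):
--         out.append((open_tag if i % 2 == 0 else close_tag) + part)
--     return ''.join(out)
--
--
-- def complete_format_to_html(string: str) -> str:
--     """Replace WhatsApp format characters with their HTML tags. Handles code blocks."""
--     if '```' in string:
--         s = string.replace('```', '<code>')
--         return _rejoin(s.split('<'), '<', '</')
--     s = string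
--     for char, tag in formatDict.items():
--         if char in string and string.count(char) % 2 == 0:
--             s = _rejoin(s.split(char), f'<{tag}>', f'</{tag}>')
--     return s
-- ===== Notes on version B (the rewrite author's own statement) =====
-- stated objective: simpler
-- what changed: Replaces the list-of-chars mutation with a threaded first_tag toggle boolean by split-on-the-marker plus join, prefixing later segments with alternating open/close tags (code branch splits on '<' after the ``` replacement).
import Mathlib
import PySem

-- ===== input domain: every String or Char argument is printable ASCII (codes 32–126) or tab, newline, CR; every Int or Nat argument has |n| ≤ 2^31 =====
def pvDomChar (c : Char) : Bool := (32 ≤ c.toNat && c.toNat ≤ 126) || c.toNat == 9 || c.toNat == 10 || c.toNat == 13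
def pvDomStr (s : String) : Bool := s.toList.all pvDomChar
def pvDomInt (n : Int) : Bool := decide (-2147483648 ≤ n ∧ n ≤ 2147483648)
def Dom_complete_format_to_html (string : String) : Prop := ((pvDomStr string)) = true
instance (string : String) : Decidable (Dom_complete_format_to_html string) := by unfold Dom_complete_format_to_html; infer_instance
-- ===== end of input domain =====

-- B replaces A's char-list mutation with a toggle flag by split/join segment reassembly (objective: simpler decomposition).


-- ===== PORT A =====
-- formatDict = {'_': 'em', '*': 'strong', '~': 'del'} : iterated only via .items(), ported as the pair list in insertion order
def pvFormatDict : List (Char × List Char) :=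
  [('_', ['e', 'm']), ('*', ['s', 't', 'r', 'o', 'n', 'g']), ('~', ['d', 'e', 'l'])]

-- the inner 'for x, letter in enumerate(list_string): if letter == char: …' loop of simple_format_to_html:
-- cells of the Python list are strings, modelled as List Char; the toggled first_tag is threaded through
def pvTagPass (c : Char) (tag : List Char) : Bool → List (List Char) → Bool × List (List Char)
  | b, [] => (b, [])
  | b, x :: xs =>
    if x = [c] then
      if b then
        let r := pvTagPass c tag false xs
        (r.1, ('<' :: tag ++ ['>']) :: r.2)
      else
        let r := pvTagPass c tag true xs
        (r.1, ('<' :: '/' :: tag ++ ['>']) :: r.2)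
    else
      let r := pvTagPass c tag b xs
      (r.1, x :: r.2)

def simple_format_to_html (string : String) : String :=
  let s := string.toList
  let res := pvFormatDict.foldl
    (fun acc p =>
      if PySem.Chars.isIn [p.1] s && PySem.Chars.count s [p.1] % 2 == 0 then
        pvTagPass p.1 p.2 acc.1 acc.2
      else acc)
    (true, s.map (fun ch => [ch]))
  String.mk res.2.flatten

-- the 'for x, letter in enumerate(list_string): if letter == '<': …' loop of the code branch
def pvCodePass : Bool → List Char → List (List Char)
  | _, [] => []
  | b, x :: xs =>
    if x = '<' then
      if b then [x] :: pvCodePass false xs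
      else ['<', '/'] :: pvCodePass true xs
    else [x] :: pvCodePass b xs

def complete_format_to_html (string : String) : String :=
  if PySem.Chars.isIn ['`', '`', '`'] string.toList then
    let s := PySem.Chars.replace string.toList ['`', '`', '`'] ['<', 'c', 'o', 'd', 'e', '>']
    String.mk (pvCodePass true s).flatten
  else
    simple_format_to_html string

-- ===== PORT B =====
-- hand port of Python's s.split(sep) for a ONE-char separator (exact there: split at every occurrence,
-- empty pieces kept, s.count(sep)+1 pieces)
def pvSplitOnChar (c : Char) : List Char → List (List Char)
  | [] => [[]]
  | x :: xs => if x = c then [] :: pvSplitOnChar c xs else (pvSplitOnChar c xs).modifyHead (x :: ·)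

-- the 'for i, part in enumerate(parts[1:])' loop of _rejoin; the i % 2 parity is the Bool
def pvRejoinGo (openT closeT : List Char) : Bool → List (List Char) → List Char
  | _, [] => []
  | b, p :: rest => (if b then openT else closeT) ++ p ++ pvRejoinGo openT closeT (!b) rest

-- _rejoin(parts, open_tag, close_tag); parts = a split result is never [], the [] branch is a totality guard
def pvRejoin (openT closeT : List Char) : List (List Char) → List Char
  | [] => []
  | p :: rest => p ++ pvRejoinGo openT closeT true rest

def complete_format_to_html_alt (string : String) : String :=
  if PySem.Chars.isIn ['`', '`', '`'] string.toList then
    let s := PySem.Chars.replace string.toList ['`', '`', '`'] ['<', 'c', 'o', 'd', 'e', '>']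
    String.mk (pvRejoin ['<'] ['<', '/'] (pvSplitOnChar '<' s))
  else
    String.mk (pvFormatDict.foldl
      (fun s p =>
        if PySem.Chars.isIn [p.1] string.toList && PySem.Chars.count string.toList [p.1] % 2 == 0 then
          pvRejoin ('<' :: p.2 ++ ['>']) ('<' :: '/' :: p.2 ++ ['>']) (pvSplitOnChar p.1 s)
        else s)
      string.toList)

-- ===== PRECONDITION & SPEC =====
def Spec_complete_format_to_html (string : String) (out : String) : Prop := out = complete_format_to_html_alt string
instance (string : String) (out : String) : Decidable (Spec_complete_format_to_html string out) := by unfold Spec_complete_format_to_html; infer_instance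

-- ===== CLAIM (what is proved, stated in full; the proofs are below) =====
def Claim_equal_complete_format_to_html : Prop := ∀ (string : String), Dom_complete_format_to_html string → Spec_complete_format_to_html string (complete_format_to_html string)

-- ===== LEMMAS AND PROOFS =====

-- proof-side generalisation of pvRejoin to an arbitrary starting parity
def pvF (openT closeT : List Char) (b : Bool) : List (List Char) → List Char
  | [] => []
  | p :: rest => p ++ pvRejoinGo openT closeT b rest

theorem pvRejoin_eq_F (openT closeT : List Char) (parts : List (List Char)) :
    pvRejoin openT closeT parts = pvF openT closeT true parts := by
  cases parts <;> rfl

theorem pvSplit_exists (c : Char) (l : List Char) :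
    ∃ h t, pvSplitOnChar c l = h :: t := by
  induction l with
  | nil => exact ⟨[], [], rfl⟩
  | cons x xs ih =>
    obtain ⟨h, t, hht⟩ := ih
    by_cases hx : x = c
    · exact ⟨[], pvSplitOnChar c xs, by simp [pvSplitOnChar, hx]⟩
    · exact ⟨x :: h, t, by simp [pvSplitOnChar, hx, hht]⟩

theorem pvSplit_append (c : Char) (y l : List Char) (hy : c ∉ y) :
    pvSplitOnChar c (y ++ l) = (pvSplitOnChar c l).modifyHead (y ++ ·) := by
  induction y with
  | nil =>
    obtain ⟨h, t, hht⟩ := pvSplit_exists c l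
    simp [hht, List.modifyHead]
  | cons a y ih =>
    have ha : a ≠ c := fun h => hy (h ▸ List.mem_cons_self)
    have hy' : c ∉ y := fun h => hy (List.mem_cons_of_mem _ h)
    obtain ⟨h, t, hht⟩ := pvSplit_exists c l
    simp [pvSplitOnChar, ha, ih hy', hht]

-- code branch: the toggle pass over single chars = split on '<' and rejoin
theorem pvCode_eq (s : List Char) (b : Bool) :
    (pvCodePass b s).flatten = pvF ['<'] ['<', '/'] b (pvSplitOnChar '<' s) := by
  induction s generalizing b with
  | nil => simp [pvCodePass, pvSplitOnChar, pvF, pvRejoinGo]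
  | cons x xs ih =>
    obtain ⟨h, t, hht⟩ := pvSplit_exists '<' xs
    by_cases hx : x = '<'
    · subst hx
      cases b <;>
        simp [pvCodePass, pvSplitOnChar, pvF, pvRejoinGo, ih, hht]
    · have : pvSplitOnChar '<' (x :: xs) = (x :: h) :: t := by
        simp [pvSplitOnChar, hx, hht]
      cases b <;> simp [pvCodePass, hx, this, pvF, ih, hht]

-- simple branch: one tag pass over a cell list whose cells are either the bare format char or avoid it
theorem pvTag_eq (c : Char) (tag : List Char) (cells : List (List Char)) (b : Bool)
    (hG : ∀ y ∈ cells, y = [c] ∨ c ∉ y) :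
    ((pvTagPass c tag b cells).2).flatten
      = pvF ('<' :: tag ++ ['>']) ('<' :: '/' :: tag ++ ['>']) b (pvSplitOnChar c cells.flatten) := by
  induction cells generalizing b with
  | nil => simp [pvTagPass, pvSplitOnChar, pvF, pvRejoinGo]
  | cons y ys ih =>
    have hGy := hG y List.mem_cons_self
    have hG' : ∀ z ∈ ys, z = [c] ∨ c ∉ z := fun z hz => hG z (List.mem_cons_of_mem _ hz)
    obtain ⟨h, t, hht⟩ := pvSplit_exists c ys.flatten
    rcases hGy with hy | hy
    · subst hy
      have hsplit : pvSplitOnChar c (c :: ys.flatten) = [] :: h :: t := by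
        simp [pvSplitOnChar, hht]
      cases b <;>
        simp [pvTagPass, hsplit, hht, pvF, pvRejoinGo, ih _ hG']
    · have hyne : y ≠ [c] := by
        intro h'; exact hy (h' ▸ List.mem_cons_self)
      have hsplit : pvSplitOnChar c (y ++ ys.flatten) = (y ++ h) :: t := by
        rw [pvSplit_append c y ys.flatten hy, hht]
        rfl
      cases b <;>
        simp [pvTagPass, hyne, hsplit, pvF, ih _ hG', hht]

-- the threaded first_tag comes back unchanged after an even number of matches
theorem pvTagPass_cons_eq (c : Char) (tag : List Char) (b : Bool) (ys : List (List Char)) :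
    pvTagPass c tag b ([c] :: ys)
      = ((pvTagPass c tag (!b) ys).1,
          (if b then ('<' :: tag ++ ['>']) else ('<' :: '/' :: tag ++ ['>'])) :: (pvTagPass c tag (!b) ys).2) := by
  cases b <;> simp [pvTagPass]

theorem pvTagPass_cons_ne (c : Char) (tag : List Char) (b : Bool) (y : List Char)
    (ys : List (List Char)) (hy : y ≠ [c]) :
    pvTagPass c tag b (y :: ys) = ((pvTagPass c tag b ys).1, y :: (pvTagPass c tag b ys).2) := by
  simp [pvTagPass, hy]

-- the threaded first_tag comes back unchanged after an even number of matches
theorem pvTag_bool (c : Char) (tag : List Char) (cells : List (List Char)) (b : Bool) :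
    (pvTagPass c tag b cells).1 = if cells.count [c] % 2 = 0 then b else !b := by
  induction cells generalizing b with
  | nil => simp [pvTagPass]
  | cons y ys ih =>
    by_cases hy : y = [c]
    · subst hy
      rw [pvTagPass_cons_eq, ih]
      have hcnt : ([c] :: ys).count [c] = ys.count [c] + 1 := by simp
      rw [hcnt]
      by_cases hp : ys.count [c] % 2 = 0
      · have hp1 : ¬ (ys.count [c] + 1) % 2 = 0 := by omega
        simp [hp, hp1]
      · have hp1 : (ys.count [c] + 1) % 2 = 0 := by omega
        simp [hp, hp1, Bool.not_not]
    · rw [pvTagPass_cons_ne c tag b y ys hy, ih]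
      have hcnt : (y :: ys).count [c] = ys.count [c] := by simp [hy]
      rw [hcnt]

-- a pass for one format char keeps the cell structure seen by any other format char intact
theorem pvTag_preserve (c c' : Char) (tag : List Char) (cells : List (List Char)) (b : Bool)
    (hne : c' ≠ c)
    (hop : c' ∉ ('<' :: tag ++ ['>'])) (hcl : c' ∉ ('<' :: '/' :: tag ++ ['>']))
    (hG : ∀ y ∈ cells, y = [c'] ∨ c' ∉ y) :
    (∀ y ∈ (pvTagPass c tag b cells).2, y = [c'] ∨ c' ∉ y) ∧
      ((pvTagPass c tag b cells).2).count [c'] = cells.count [c'] := by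
  induction cells generalizing b with
  | nil => simp [pvTagPass]
  | cons y ys ih =>
    have hG' : ∀ z ∈ ys, z = [c'] ∨ c' ∉ z := fun z hz => hG z (List.mem_cons_of_mem _ hz)
    have hcne : ([c] : List Char) ≠ [c'] := by
      simp only [ne_eq, List.cons.injEq, and_true]
      exact fun h => hne h.symm
    by_cases hy : y = [c]
    · subst hy
      rw [pvTagPass_cons_eq]
      cases b
      · refine ⟨?_, ?_⟩
        · intro z hz
          rcases List.mem_cons.mp hz with hz | hz
          · subst hz; right; simpa using hcl
          · exact (ih _ hG').1 z hz
        · simp [hcne, (ih _ hG').2]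
      · refine ⟨?_, ?_⟩
        · intro z hz
          rcases List.mem_cons.mp hz with hz | hz
          · subst hz; right; simpa using hop
          · exact (ih _ hG').1 z hz
        · simp [hcne, (ih _ hG').2]
    · rw [pvTagPass_cons_ne c tag b y ys hy]
      constructor
      · intro z hz
        rcases List.mem_cons.mp hz with hz | hz
        · subst hz; exact hG z List.mem_cons_self
        · exact (ih b hG').1 z hz
      · simp [List.count_cons, (ih b hG').2]

theorem pvCount_map (c : Char) (s : List Char) :
    (s.map (fun ch => [ch])).count [c] = s.count c := by
  induction s with
  | nil => rfl
  | cons x xs ih => simp [List.count_cons, ih]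

-- PySem.Chars.count for a single-char needle is List.count
theorem pvCountGo_single (c : Char) :
    ∀ (fuel : Nat) (l : List Char) (acc : Nat), l.length ≤ fuel →
      PySem.Chars.count.go [c] fuel l acc = acc + l.count c := by
  intro fuel
  induction fuel with
  | zero =>
    intro l acc hl
    have : l = [] := List.eq_nil_of_length_eq_zero (Nat.le_zero.mp hl)
    subst this; rfl
  | succ n ih =>
    intro l acc hl
    cases l with
    | nil => rfl
    | cons x xs =>
      have hxs : xs.length ≤ n := by simpa using hl
      by_cases hx : c = x
      · subst hx
        have hpre : [c].isPrefixOf (c :: xs) = true := by simp [List.isPrefixOf]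
        simp only [PySem.Chars.count.go, hpre, if_pos]
        simp only [List.length_cons, List.length_nil, List.drop_succ_cons, List.drop_zero]
        rw [ih xs (acc + 1) hxs]
        simp
        omega
      · have hxc : ¬ x = c := fun h => hx h.symm
        have hpre : [c].isPrefixOf (x :: xs) = false := by
          simp [List.isPrefixOf]; exact hx
        simp only [PySem.Chars.count.go, hpre]
        simp only [Bool.false_eq_true, if_false]
        rw [ih xs acc hxs]
        simp [hxc]

theorem pvCount_single (c : Char) (l : List Char) :
    PySem.Chars.count l [c] = l.count c := by
  simp only [PySem.Chars.count, List.isEmpty_cons, Bool.false_eq_true, if_false]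
  simpa using pvCountGo_single c l.length l 0 le_rfl

theorem pvFlatten_map (s : List Char) : (s.map (fun ch => [ch])).flatten = s := by
  induction s with
  | nil => rfl
  | cons x xs ih => simp [ih]

-- the whole simple branch: A's fold over (first_tag, cells) = B's fold over the joined string
theorem pvFold_eq (orig : List Char) :
    ∀ (ps : List (Char × List Char)) (cells : List (List Char)),
      (∀ p ∈ ps, ∀ y ∈ cells, y = [p.1] ∨ p.1 ∉ y) →
      (∀ p ∈ ps, cells.count [p.1] = orig.count p.1) →
      (∀ p ∈ ps, ∀ q ∈ ps, p.1 ∉ ('<' :: q.2 ++ ['>']) ∧ p.1 ∉ ('<' :: '/' :: q.2 ++ ['>'])) →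
      (ps.map Prod.fst).Nodup →
      (ps.foldl
          (fun acc p =>
            if PySem.Chars.isIn [p.1] orig && PySem.Chars.count orig [p.1] % 2 == 0 then
              pvTagPass p.1 p.2 acc.1 acc.2
            else acc)
          (true, cells)).2.flatten
        = ps.foldl
            (fun s p =>
              if PySem.Chars.isIn [p.1] orig && PySem.Chars.count orig [p.1] % 2 == 0 then
                pvRejoin ('<' :: p.2 ++ ['>']) ('<' :: '/' :: p.2 ++ ['>']) (pvSplitOnChar p.1 s)
              else s)
            cells.flatten := by
  intro ps
  induction ps with
  | nil => intro cells _ _ _ _; rfl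
  | cons p ps ih =>
    intro cells hG hcnt htag hnd
    have hGp := hG p List.mem_cons_self
    simp only [List.foldl_cons]
    by_cases hg : (PySem.Chars.isIn [p.1] orig && PySem.Chars.count orig [p.1] % 2 == 0) = true
    · have heven : cells.count [p.1] % 2 = 0 := by
        have h2 := hg
        simp only [Bool.and_eq_true, beq_iff_eq] at h2
        rw [hcnt p List.mem_cons_self, ← pvCount_single p.1 orig]
        exact h2.2
      have hbool : (pvTagPass p.1 p.2 true cells).1 = true := by
        rw [pvTag_bool]; simp [heven]
      have hflat : (pvTagPass p.1 p.2 true cells).2.flatten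
          = pvRejoin ('<' :: p.2 ++ ['>']) ('<' :: '/' :: p.2 ++ ['>'])
              (pvSplitOnChar p.1 cells.flatten) := by
        rw [pvRejoin_eq_F]; exact pvTag_eq p.1 p.2 cells true hGp
      have hstate : (if PySem.Chars.isIn [p.1] orig && PySem.Chars.count orig [p.1] % 2 == 0 then
            pvTagPass p.1 p.2 (true, cells).1 (true, cells).2 else (true, cells))
          = (true, (pvTagPass p.1 p.2 true cells).2) := by
        simp only [hg, if_pos]
        exact Prod.ext hbool rfl
      rw [hstate]
      have hpres : ∀ q ∈ ps,
          (∀ y ∈ (pvTagPass p.1 p.2 true cells).2, y = [q.1] ∨ q.1 ∉ y) ∧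
            ((pvTagPass p.1 p.2 true cells).2).count [q.1] = cells.count [q.1] := by
        intro q hq
        have hqp : q.1 ≠ p.1 := by
          intro h
          have : q.1 ∈ ps.map Prod.fst := List.mem_map_of_mem hq
          rw [h] at this
          exact (List.nodup_cons.mp hnd).1 this
        exact pvTag_preserve p.1 q.1 p.2 cells true hqp
          (htag q (List.mem_cons_of_mem _ hq) p List.mem_cons_self).1
          (htag q (List.mem_cons_of_mem _ hq) p List.mem_cons_self).2
          (hG q (List.mem_cons_of_mem _ hq))
      rw [ih ((pvTagPass p.1 p.2 true cells).2)
            (fun q hq => (hpres q hq).1)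
            (fun q hq => by rw [(hpres q hq).2]; exact hcnt q (List.mem_cons_of_mem _ hq))
            (fun q hq r hr => htag q (List.mem_cons_of_mem _ hq) r (List.mem_cons_of_mem _ hr))
            (List.nodup_cons.mp hnd).2]
      rw [hflat]
      simp [hg]
    · have hgf : (PySem.Chars.isIn [p.1] orig && PySem.Chars.count orig [p.1] % 2 == 0) = false :=
        Bool.not_eq_true _ ▸ (by simpa using hg)
      simp only [hgf, Bool.false_eq_true, if_false]
      exact ih cells
        (fun q hq => hG q (List.mem_cons_of_mem _ hq))
        (fun q hq => hcnt q (List.mem_cons_of_mem _ hq))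
        (fun q hq r hr => htag q (List.mem_cons_of_mem _ hq) r (List.mem_cons_of_mem _ hr))
        (List.nodup_cons.mp hnd).2

-- ===== VERDICT (by name: the statement is the Claim_ definition above) =====
theorem complete_format_to_html_spec : Claim_equal_complete_format_to_html := by
  intro string _
  unfold Spec_complete_format_to_html complete_format_to_html complete_format_to_html_alt
  by_cases hc : PySem.Chars.isIn ['`', '`', '`'] string.toList = true
  · simp only [hc, if_pos]
    exact congrArg String.mk (by rw [pvRejoin_eq_F]; exact pvCode_eq _ true)
  · simp only [hc, Bool.false_eq_true, if_false]
    unfold simple_format_to_html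
    refine congrArg String.mk ?_
    have := pvFold_eq string.toList pvFormatDict
      (string.toList.map (fun ch => [ch]))
      (by intro p hp y hy
          simp only [List.mem_map] at hy
          obtain ⟨ch, _, rfl⟩ := hy
          by_cases h : ch = p.1
          · subst h; left; rfl
          · right; simp [Ne.symm h])
      (by intro p hp; exact pvCount_map p.1 string.toList)
      (by decide)
      (by decide)
    rw [pvFlatten_map] at this
    exact this
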